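-- pv_equiv track=rewrite | github.com/jiayi-xian/coding | leetcode_codes/Gucheng/reverse_count_and_say.py | reverseCountSay
-- ===== SOURCE A (Python) =====
-- from collections import defaultdict
--
-- def reverseCountSay(s):
--     memo = defaultdict(list)
--
--     def recursive(s):
--         if len(s) == 0:
--             return [[]]
--         elif s in memo:
--             return memo[s]
--         for i in range(1, len(s)):
--             curNum, count = s[i], int(s[:i])
--             for subRes in recursive(s[i + 1:]):
--                 memo[s].append([curNum * count] + subRes)
--         return memo[s]
--     recursive(s)
--     return [''.join(output) for output in memo[s]]
-- ===== SOURCE B (Python) =====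
-- def reverseCountSay(s):
--     n = len(s)
--     dp = {n: [[]]}
--     for p in range(n - 1, -1, -1):
--         dp[p] = [[s[p + i] * int(s[p:p + i])] + tail
--                  for i in range(1, n - p)
--                  for tail in dp[p + i + 1]]
--     return [''.join(out) for out in dp[0]]
-- ===== Notes on version B (the rewrite author's own statement) =====
-- stated objective: alternative
-- what changed: Replaced the memoized top-down recursion (a nested recursive closure threading a defaultdict of suffix results) by an explicit bottom-up DP table over suffix start positions, filled p = n-1 .. 0 with a comprehension.
-- intended difference: On the empty string A returns [] (recursive('') yields [[]] but the memo entry is never written, an artefact of the memo dict), while B returns [''] - the one decoding of the empty string - which is the intended value. — e.g. on reverseCountSay(""): A returns [], B returns [""]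
-- outside the precondition, e.g. on reverseCountSay('1 2'): A returns ['2'], B raises ValueError
import Mathlib
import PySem

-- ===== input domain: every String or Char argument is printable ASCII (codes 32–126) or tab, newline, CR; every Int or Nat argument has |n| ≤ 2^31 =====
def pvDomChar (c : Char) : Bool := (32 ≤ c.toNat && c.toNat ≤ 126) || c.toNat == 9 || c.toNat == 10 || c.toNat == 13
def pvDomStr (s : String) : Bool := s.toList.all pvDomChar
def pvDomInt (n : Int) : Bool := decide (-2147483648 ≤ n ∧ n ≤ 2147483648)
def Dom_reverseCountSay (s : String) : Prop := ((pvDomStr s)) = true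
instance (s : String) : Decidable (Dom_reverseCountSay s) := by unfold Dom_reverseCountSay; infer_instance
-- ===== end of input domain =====

-- B replaces A's memoized top-down recursion by an explicit bottom-up DP over suffix start
-- positions (alternative decomposition, same cost); equivalence is about the RETURN value only.

-- int(cs) as used by both ports; exact on the digit strings admitted by Pre_ (Python raises
-- ValueError elsewhere, and those inputs are excluded by Pre_).
def intOf (cs : List Char) : Int := (PySem.Int.ofChars? cs).getD 0

abbrev MemoA := PySem.Dict (List Char) (List (List (List Char)))

-- ===== PORT A =====
-- recursive(s) with the memo dict threaded through; fuel ≥ |t| makes the structural recursion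
-- total (the fuel-0 branch is unreachable at the call below).
def recA : Nat → MemoA → List Char → (List (List (List Char)) × MemoA)
  | fuel, memo, t =>
    if t.length = 0 then ([[]], memo)
    else
      match fuel with
      | 0 => ([], memo)
      | fuel + 1 =>
        match memo.get? t with
        | some v => (v, memo)                                     -- elif s in memo
        | none =>
          let m := (List.range' 1 (t.length - 1)).foldl (fun m i =>   -- for i in range(1, len(s))
              let count := intOf (t.take i)                           -- int(s[:i])
              let cur := t.getD i ' '                                 -- s[i]
              let p := recA fuel m (t.drop (i + 1))                   -- recursive(s[i+1:])
              p.1.foldl (fun m2 sub =>                                -- memo[s].append([cur*count] + subRes)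
                m2.insert t (m2.getD t [] ++ [List.replicate count.toNat cur :: sub])) p.2) memo
          -- `return memo[s]` on a defaultdict: creates the (empty) entry when absent
          match m.get? t with
          | some v => (v, m)
          | none => ([], m.insert t [])

def reverseCountSay (s : String) : List String :=
  ((recA s.toList.length PySem.Dict.empty s.toList).2.getD s.toList []).map
    (fun out => String.ofList (PySem.Chars.join [] out))   -- [''.join(output) for output in memo[s]]

-- ===== PORT B =====
-- bottom-up DP: dp is kept as a list whose j-th entry holds the decodings of the suffix
-- starting at position p+1+j (head = most recently computed position); dp[p+i+1] is dp[j] with j = i.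
def reverseCountSay_alt (s : String) : List String :=
  ((((List.range s.toList.length).foldl                             -- for p in range(n-1, -1, -1)
      (fun dp pk =>
        let p := s.toList.length - 1 - pk
        ((List.range' 1 (s.toList.length - p - 1)).flatMap (fun i =>    -- for i in range(1, n-p)
          ((dp[i]?).getD []).map (fun tail =>                           -- for tail in dp[p+i+1]
            List.replicate (intOf ((s.toList.drop p).take i)).toNat (s.toList.getD (p + i) ' ') :: tail))) :: dp)
      [[[]]])[0]?).getD []).map (fun out => String.ofList (PySem.Chars.join [] out))

-- ===== PRECONDITION & SPEC =====
-- Pre_ admits every string whose characters before the last are decimal digits (this includes all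
-- digit strings, the natural count-and-say domain, and every string of length <= 1): there all
-- int() windows of both programs are plain digit runs. Outside it Python A either raises
-- ValueError on int(s[:i]), or (when only A's reachable windows happen to be numeric thanks to
-- int()'s leniency, e.g. '1 2') returns a value on which B itself raises ValueError, so those
-- inputs are excluded.
def Pre_reverseCountSay (s : String) : Prop := s.toList.dropLast.all Char.isDigit = true
instance (s : String) : Decidable (Pre_reverseCountSay s) := by unfold Pre_reverseCountSay; infer_instance
def pvWitness_reverseCountSay : String := "1211"

-- On the empty string A returns [] (recursive('') returns [[\']] but the memo entry is never
-- written, an artefact of the memo), while B returns [''] — the one decoding of the empty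
-- string — which is the intended value.
def D_reverseCountSay (s : String) : Prop := s = ""
instance (s : String) : Decidable (D_reverseCountSay s) := by unfold D_reverseCountSay; infer_instance

def Spec_reverseCountSay (s : String) (out : List String) : Prop := ¬ D_reverseCountSay s → out = reverseCountSay_alt s
instance (s : String) (out : List String) : Decidable (Spec_reverseCountSay s out) := by unfold Spec_reverseCountSay; infer_instance

def pvDiffWitness_reverseCountSay : String := ""
def pvDiffWitnessOut_reverseCountSay : (List String) × (List String) := ([], [""])

-- ===== CLAIM (what is proved, stated in full; the proofs are below) =====
def Claim_unchanged_reverseCountSay : Prop := ∀ (s : String), Dom_reverseCountSay s → Pre_reverseCountSay s → Spec_reverseCountSay s (reverseCountSay s)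
def Claim_changed_reverseCountSay : Prop := Dom_reverseCountSay (pvDiffWitness_reverseCountSay) ∧ Pre_reverseCountSay (pvDiffWitness_reverseCountSay) ∧ D_reverseCountSay (pvDiffWitness_reverseCountSay) ∧ reverseCountSay (pvDiffWitness_reverseCountSay) = pvDiffWitnessOut_reverseCountSay.1 ∧ reverseCountSay_alt (pvDiffWitness_reverseCountSay) = pvDiffWitnessOut_reverseCountSay.2 ∧ pvDiffWitnessOut_reverseCountSay.1 ≠ pvDiffWitnessOut_reverseCountSay.2
def Claim_exact_reverseCountSay : Prop := ∀ (s : String), Dom_reverseCountSay s → Pre_reverseCountSay s → D_reverseCountSay s → reverseCountSay s ≠ reverseCountSay_alt s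

-- ===== LEMMAS AND PROOFS =====

-- one decoded segment: s[i] * int(s[:i])
def seg (t : List Char) (i : Nat) : List Char := List.replicate (intOf (t.take i)).toNat (t.getD i ' ')

-- the common specification: decodings of t, fuelled
def Pf : Nat → List Char → List (List (List Char))
  | 0, _ => []
  | f + 1, t => (List.range' 1 (t.length - 1)).flatMap (fun i =>
      (if (t.drop (i + 1)).length = 0 then [[]] else Pf f (t.drop (i + 1))).map (seg t i :: ·))

def P (t : List Char) : List (List (List Char)) := Pf t.length t
def Q (t : List Char) : List (List (List Char)) := if t.length = 0 then [[]] else P t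

lemma Pf_congr : ∀ (n : Nat) (t : List Char), t.length ≤ n →
    ∀ f g, t.length ≤ f + 1 → t.length ≤ g + 1 → Pf (f + 1) t = Pf (g + 1) t := by
  intro n
  induction n with
  | zero =>
    intro t ht f g _ _
    have : t = [] := List.eq_nil_of_length_eq_zero (Nat.le_zero.mp ht)
    subst this
    simp [Pf]
  | succ n ih =>
    intro t ht f g hf hg
    simp only [Pf]
    apply List.flatMap_congr
    intro i hi
    obtain ⟨h1, _⟩ := List.mem_range'_1.mp hi
    by_cases hd : (t.drop (i + 1)).length = 0
    · simp [hd]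
    · simp only [if_neg hd]
      have hlen : (t.drop (i + 1)).length = t.length - (i + 1) := List.length_drop ..
      -- t.length ≥ 2 here (the range is nonempty), so f and g are ≥ 1
      have ht2 : 2 ≤ t.length := by
        rcases Nat.lt_or_ge t.length 2 with h | h
        · exfalso; apply hd; omega
        · exact h
      obtain ⟨f', rfl⟩ : ∃ f', f = f' + 1 := ⟨f - 1, by omega⟩
      obtain ⟨g', rfl⟩ : ∃ g', g = g' + 1 := ⟨g - 1, by omega⟩
      have := ih (t.drop (i + 1)) (by omega) f' g' (by omega) (by omega)
      rw [this]

lemma Pf_eq_P (f : Nat) (t : List Char) (h : t.length ≤ f) : Pf f t = P t := by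
  unfold P
  cases f with
  | zero =>
    have : t = [] := List.eq_nil_of_length_eq_zero (Nat.le_zero.mp h)
    subst this; rfl
  | succ f =>
    by_cases h0 : t.length = 0
    · have : t = [] := List.eq_nil_of_length_eq_zero h0
      subst this; simp [Pf]
    · obtain ⟨m, hm⟩ : ∃ m, t.length = m + 1 := ⟨t.length - 1, by omega⟩
      rw [hm]
      exact Pf_congr t.length t le_rfl f m (by omega) (by omega)

lemma P_unfold (t : List Char) :
    P t = (List.range' 1 (t.length - 1)).flatMap (fun i => (Q (t.drop (i + 1))).map (seg t i :: ·)) := by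
  by_cases h0 : t.length = 0
  · have : t = [] := List.eq_nil_of_length_eq_zero h0
    subst this; rfl
  · obtain ⟨m, hm⟩ : ∃ m, t.length = m + 1 := ⟨t.length - 1, by omega⟩
    unfold P
    rw [hm]
    simp only [Pf, hm]
    apply List.flatMap_congr
    intro i hi
    obtain ⟨h1, h2⟩ := List.mem_range'_1.mp hi
    unfold Q
    by_cases hd : (t.drop (i + 1)).length = 0
    · simp [hd]
    · have hlen : (t.drop (i + 1)).length = t.length - (i + 1) := List.length_drop ..
      rw [if_neg hd, if_neg hd, Pf_eq_P m _ (by omega)]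

-- ---- A side: the inner append loop touches only key t ----

lemma innerA_get? (t : List Char) (e : List (List Char) → List (List Char)) :
    ∀ (l : List (List (List Char))) (m : MemoA) (k : List Char), k ≠ t →
      (l.foldl (fun m2 sub => m2.insert t (m2.getD t [] ++ [e sub])) m).get? k = m.get? k := by
  intro l
  induction l with
  | nil => intro m k _; rfl
  | cons x l ih =>
    intro m k hk
    simp only [List.foldl_cons]
    rw [ih _ k hk, PySem.Dict.get?_insert_of_ne _ _ hk]

lemma innerA_getD (t : List Char) (e : List (List Char) → List (List Char)) :
    ∀ (l : List (List (List Char))) (m : MemoA),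
      (l.foldl (fun m2 sub => m2.insert t (m2.getD t [] ++ [e sub])) m).getD t []
        = m.getD t [] ++ l.map e := by
  intro l
  induction l with
  | nil => intro m; simp
  | cons x l ih =>
    intro m
    simp only [List.foldl_cons, List.map_cons]
    rw [ih, PySem.Dict.getD_insert_self]
    simp

-- ---- A side: unfolding recA at positive fuel on a nonempty string ----

lemma recA_eq (fuel : Nat) (m : MemoA) (t : List Char) (h : ¬ t.length = 0) :
    recA (fuel + 1) m t =
      match m.get? t with
      | some v => (v, m)
      | none =>
        let m' := (List.range' 1 (t.length - 1)).foldl (fun m i =>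
            (recA fuel m (t.drop (i + 1))).1.foldl (fun m2 sub =>
              m2.insert t (m2.getD t [] ++ [List.replicate (intOf (t.take i)).toNat (t.getD i ' ') :: sub]))
              (recA fuel m (t.drop (i + 1))).2) m
        match m'.get? t with
        | some v => (v, m')
        | none => ([], m'.insert t []) := by
  conv_lhs => rw [recA]
  rw [if_neg h]

-- ---- A side: the loop over i accumulates exactly the flatMap of P_unfold ----

lemma foldA_spec (fuel : Nat) (t : List Char) (htne : t ≠ [])
    (ht : t.length ≤ fuel + 1)
    (IH : ∀ (t' : List Char) (m' : MemoA), t'.length ≤ fuel →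
      (∀ k v, m'.get? k = some v → k.length ≤ t'.length → v = P k) →
      (recA fuel m' t').1 = Q t'
      ∧ (∀ k, t'.length < k.length → (recA fuel m' t').2.get? k = m'.get? k)
      ∧ (∀ k v, (recA fuel m' t').2.get? k = some v → k.length ≤ t'.length → v = P k)) :
    ∀ (is : List Nat), (∀ i ∈ is, 1 ≤ i) → ∀ m : MemoA,
      (∀ k v, m.get? k = some v → k.length < t.length → v = P k) →
      (is.foldl (fun m i =>
          (recA fuel m (t.drop (i + 1))).1.foldl (fun m2 sub =>
            m2.insert t (m2.getD t [] ++ [List.replicate (intOf (t.take i)).toNat (t.getD i ' ') :: sub]))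
            (recA fuel m (t.drop (i + 1))).2) m).getD t []
        = m.getD t [] ++ is.flatMap (fun i => (Q (t.drop (i + 1))).map (seg t i :: ·))
      ∧ (∀ k, t.length ≤ k.length → k ≠ t →
          (is.foldl (fun m i =>
            (recA fuel m (t.drop (i + 1))).1.foldl (fun m2 sub =>
              m2.insert t (m2.getD t [] ++ [List.replicate (intOf (t.take i)).toNat (t.getD i ' ') :: sub]))
              (recA fuel m (t.drop (i + 1))).2) m).get? k = m.get? k)
      ∧ (∀ k v, (is.foldl (fun m i =>
            (recA fuel m (t.drop (i + 1))).1.foldl (fun m2 sub =>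
              m2.insert t (m2.getD t [] ++ [List.replicate (intOf (t.take i)).toNat (t.getD i ' ') :: sub]))
              (recA fuel m (t.drop (i + 1))).2) m).get? k = some v → k.length < t.length → v = P k) := by
  intro is
  induction is with
  | nil =>
    intro _ m hm
    refine ⟨by simp, fun k _ _ => rfl, hm⟩
  | cons i is ih =>
    intro his m hm
    have hi1 : 1 ≤ i := his i (List.mem_cons_self ..)
    have htpos : 0 < t.length := List.length_pos_of_ne_nil htne
    have hdroplen : (t.drop (i + 1)).length = t.length - (i + 1) := List.length_drop ..
    have hlt' : (t.drop (i + 1)).length < t.length := by omega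
    obtain ⟨hQ, hunch, hcorr⟩ := IH (t.drop (i + 1)) m (by omega)
      (fun k v hk hlen => hm k v hk (by omega))
    simp only [List.foldl_cons, List.flatMap_cons]
    -- the state after processing i
    set m1 := (recA fuel m (t.drop (i + 1))).2 with hm1def
    set m2 := (recA fuel m (t.drop (i + 1))).1.foldl (fun m2 sub =>
        m2.insert t (m2.getD t [] ++ [List.replicate (intOf (t.take i)).toNat (t.getD i ' ') :: sub])) m1 with hm2def
    have h2ne : ∀ k, k ≠ t → m2.get? k = m1.get? k := fun k hk =>
      innerA_get? t (fun sub => List.replicate (intOf (t.take i)).toNat (t.getD i ' ') :: sub) _ m1 k hk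
    have h2getD : m2.getD t [] = m1.getD t [] ++ (Q (t.drop (i + 1))).map (seg t i :: ·) := by
      rw [hm2def, innerA_getD t (fun sub => List.replicate (intOf (t.take i)).toNat (t.getD i ' ') :: sub), hQ]
      rfl
    have h1t : m1.get? t = m.get? t := hunch t (by omega)
    have h1getD : m1.getD t [] = m.getD t [] := by
      rw [PySem.Dict.getD_eq_get?_getD, PySem.Dict.getD_eq_get?_getD, h1t]
    have hm2 : ∀ k v, m2.get? k = some v → k.length < t.length → v = P k := by
      intro k v hk hlen
      have hkne : k ≠ t := by intro h; subst h; omega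
      rw [h2ne k hkne] at hk
      rcases Nat.lt_or_ge (t.drop (i + 1)).length k.length with h | h
      · rw [hunch k h] at hk; exact hm k v hk hlen
      · exact hcorr k v hk h
    obtain ⟨g1, g2, g3⟩ := ih (fun j hj => his j (List.mem_cons_of_mem _ hj)) m2 hm2
    refine ⟨?_, ?_, g3⟩
    · rw [g1, h2getD, h1getD, List.append_assoc]
    · intro k hk hkt
      rw [g2 k hk hkt, h2ne k hkt, hunch k (by omega)]

-- ---- A side: recursive(t) returns the decodings of t and keeps the memo correct ----

lemma recA_spec (fuel : Nat) : ∀ (t : List Char) (m : MemoA), t.length ≤ fuel →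
    (∀ k v, m.get? k = some v → k.length ≤ t.length → v = P k) →
    (recA fuel m t).1 = Q t
    ∧ (∀ k, t.length < k.length → (recA fuel m t).2.get? k = m.get? k)
    ∧ (∀ k v, (recA fuel m t).2.get? k = some v → k.length ≤ t.length → v = P k)
    ∧ (t ≠ [] → (recA fuel m t).2.get? t = some (P t)) := by
  induction fuel with
  | zero =>
    intro t m ht hm
    have : t = [] := List.eq_nil_of_length_eq_zero (Nat.le_zero.mp ht)
    subst this
    refine ⟨rfl, fun k _ => rfl, hm, fun h => absurd rfl h⟩
  | succ fuel ih =>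
    intro t m ht hm
    by_cases h0 : t.length = 0
    · have : t = [] := List.eq_nil_of_length_eq_zero h0
      subst this
      refine ⟨rfl, fun k _ => rfl, hm, fun h => absurd rfl h⟩
    · have htne : t ≠ [] := fun h => h0 (by simp [h])
      rw [recA_eq fuel m t h0]
      have hQP : Q t = P t := if_neg h0
      cases hmt : m.get? t with
      | some v =>
        have hv : v = P t := hm t v hmt le_rfl
        exact ⟨by rw [hQP]; exact hv, fun k _ => rfl, hm, fun _ => by rw [hmt, hv]⟩
      | none =>
        have hIH : ∀ (t' : List Char) (m' : MemoA), t'.length ≤ fuel →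
            (∀ k v, m'.get? k = some v → k.length ≤ t'.length → v = P k) →
            (recA fuel m' t').1 = Q t'
            ∧ (∀ k, t'.length < k.length → (recA fuel m' t').2.get? k = m'.get? k)
            ∧ (∀ k v, (recA fuel m' t').2.get? k = some v → k.length ≤ t'.length → v = P k) := by
          intro t' m' h1 h2
          obtain ⟨a, b, c, -⟩ := ih t' m' h1 h2
          exact ⟨a, b, c⟩
        obtain ⟨g1, g2, g3⟩ := foldA_spec fuel t htne ht hIH (List.range' 1 (t.length - 1))
          (fun i hi => (List.mem_range'_1.mp hi).1) m
          (fun k v hk hlen => hm k v hk (by omega))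
        set m' := (List.range' 1 (t.length - 1)).foldl (fun m i =>
            (recA fuel m (t.drop (i + 1))).1.foldl (fun m2 sub =>
              m2.insert t (m2.getD t [] ++ [List.replicate (intOf (t.take i)).toNat (t.getD i ' ') :: sub]))
              (recA fuel m (t.drop (i + 1))).2) m with hm'def
    -- the accumulated entry is exactly P t
        have hmgetD : m.getD t [] = [] := PySem.Dict.getD_of_get?_eq_none _ _ hmt
        have hPt : m'.getD t [] = P t := by
          rw [g1, hmgetD, List.nil_append, ← P_unfold]
        cases hm't : m'.get? t with
        | some v =>
          have hv : v = P t := by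
            rw [← hPt, PySem.Dict.getD_eq_get?_getD, hm't]; rfl
          simp only [hm't]
          refine ⟨by rw [hQP]; exact hv, ?_, ?_, fun _ => by rw [hv]⟩
          · intro k hk
            exact g2 k (by omega) (fun h => by subst h; omega)
          · intro k v' hk hlen
            rcases Nat.lt_or_ge k.length t.length with h | h
            · exact g3 k v' hk h
            · by_cases hkt : k = t
              · subst hkt
                rw [hm't] at hk
                cases hk
                exact hv
              · rw [g2 k h hkt] at hk
                exact hm k v' hk hlen
        | none =>
          have hPnil : P t = [] := by
            rw [← hPt, PySem.Dict.getD_eq_get?_getD, hm't]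
            rfl
          simp only [hm't]
          refine ⟨by rw [hQP, hPnil], ?_, ?_, fun _ => ?_⟩
          · intro k hk
            rw [PySem.Dict.get?_insert_of_ne _ _ (fun h => by subst h; omega)]
            exact g2 k (by omega) (fun h => by subst h; omega)
          · intro k v' hk hlen
            by_cases hkt : k = t
            · subst hkt
              rw [PySem.Dict.get?_insert_self] at hk
              cases hk
              rw [hPnil]
            · rw [PySem.Dict.get?_insert_of_ne _ _ hkt] at hk
              rcases Nat.lt_or_ge k.length t.length with h | h
              · exact g3 k v' hk h
              · rw [g2 k h hkt] at hk
                exact hm k v' hk hlen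
          · rw [PySem.Dict.get?_insert_self, hPnil]

-- ---- B side: the dp list names the decodings of every computed suffix ----

lemma foldB_spec (cs : List Char) : ∀ (k : Nat), k ≤ cs.length →
    ((List.range k).foldl (fun dp pk =>
        let p := cs.length - 1 - pk
        ((List.range' 1 (cs.length - p - 1)).flatMap (fun i =>
          ((dp[i]?).getD []).map (fun tail =>
            List.replicate (intOf ((cs.drop p).take i)).toNat (cs.getD (p + i) ' ') :: tail))) :: dp)
      [[[]]])
      = (List.range (k + 1)).map (fun j => Q (cs.drop (cs.length - k + j))) := by
  intro k
  induction k with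
  | zero =>
    intro _
    simp [Q]
  | succ k ih =>
    intro hk
    rw [List.range_succ, List.foldl_append, List.foldl_cons, List.foldl_nil, ih (by omega)]
    simp only []
    have hp : cs.length - 1 - k = cs.length - (k + 1) := by omega
    have hlen : (cs.drop (cs.length - (k + 1))).length = k + 1 := by
      rw [List.length_drop]; omega
    have hne0 : (cs.drop (cs.length - (k + 1))).length ≠ 0 := by omega
    have hgetD : ∀ (p i : Nat), (cs.drop p).getD i ' ' = cs.getD (p + i) ' ' := by
      intro p i
      simp [List.getD_eq_getElem?_getD, List.getElem?_drop]
    have hdd : ∀ i : Nat, (cs.drop (cs.length - (k + 1))).drop (i + 1) = cs.drop (cs.length - k + i) := by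
      intro i
      rw [List.drop_drop]
      congr 1
      omega
    have hrow :
        ((List.range' 1 (cs.length - (cs.length - 1 - k) - 1)).flatMap (fun i =>
          ((((List.range (k + 1)).map (fun j => Q (cs.drop (cs.length - k + j))))[i]?).getD []).map (fun tail =>
            List.replicate (intOf ((cs.drop (cs.length - 1 - k)).take i)).toNat
              (cs.getD ((cs.length - 1 - k) + i) ' ') :: tail)))
          = Q (cs.drop (cs.length - (k + 1))) := by
      rw [Q, if_neg hne0, P_unfold, hlen]
      simp only [Nat.add_sub_cancel]
      rw [hp, show cs.length - (cs.length - (k + 1)) - 1 = k by omega]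
      apply List.flatMap_congr
      intro i hi
      obtain ⟨hi1, hi2⟩ := List.mem_range'_1.mp hi
      rw [List.getElem?_map, List.getElem?_range (by omega : i < k + 1)]
      simp only [Option.map_some, Option.getD_some]
      rw [hdd i]
      apply List.map_congr_left
      intro tail _
      rw [seg, hgetD (cs.length - (k + 1)) i]
    rw [hrow]
    conv_rhs => rw [List.range_succ_eq_map]
    simp only [List.map_cons, List.map_map, Nat.add_zero]
    congr 1
    apply List.map_congr_left
    intro j _
    simp only [Function.comp_apply]
    congr 2
    omega

-- ---- wrapping up both ports ----

lemma alt_eq (s : String) :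
    reverseCountSay_alt s = (Q s.toList).map (fun out => String.ofList (PySem.Chars.join [] out)) := by
  unfold reverseCountSay_alt
  rw [foldB_spec s.toList s.toList.length le_rfl]
  have h0 : ((List.range (s.toList.length + 1)).map
      (fun j => Q (s.toList.drop (s.toList.length - s.toList.length + j))))[0]?
      = some (Q s.toList) := by
    rw [List.getElem?_map, List.getElem?_range (by omega)]
    simp
  rw [h0]
  rfl

lemma a_eq (s : String) (h : s.toList ≠ []) :
    reverseCountSay s = (P s.toList).map (fun out => String.ofList (PySem.Chars.join [] out)) := by
  unfold reverseCountSay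
  obtain ⟨-, -, -, h4⟩ := recA_spec s.toList.length s.toList PySem.Dict.empty le_rfl
    (by intro k v hk _; rw [PySem.Dict.get?_empty] at hk; cases hk)
  rw [PySem.Dict.getD_of_get?_eq_some _ _ (h4 h)]

theorem reverseCountSay_spec : Claim_unchanged_reverseCountSay := by
  intro s _ _ hD
  have hne : s.toList ≠ [] := by
    intro h
    exact hD (by simpa using congrArg String.ofList h)
  unfold Spec_reverseCountSay at *
  rw [a_eq s hne, alt_eq s, Q, if_neg (by simpa using hne)]

theorem reverseCountSay_changed : Claim_changed_reverseCountSay := by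
  unfold Claim_changed_reverseCountSay; decide

theorem reverseCountSay_tight : Claim_exact_reverseCountSay := by
  intro s _ _ hD
  subst hD
  decide
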